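-- pv_equiv track=rewrite | github.com/iatoolkit/iatoolkit | src/iatoolkit/services/attachment_policy_service.py | _mime_matches
-- ===== SOURCE A (Python) =====
-- from typing import Any, Dict, List
--
-- def _mime_matches(mime_type: str, rules: List[str]) -> bool:
--     mime = str(mime_type or "").lower()
--     for rule in rules:
--         rule_value = str(rule or "").lower().strip()
--         if not rule_value:
--             continue
--         if rule_value in ("*", "*/*"):
--             return True
--         if rule_value.endswith("/*"):
--             if mime.startswith(rule_value[:-1]):
--                 return True
--             continue
--         if mime == rule_value:
--             return True
--     return False
-- ===== SOURCE B (Python) =====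
-- def _mime_matches(mime_type, rules):
--     mime = str(mime_type or "").lower()
--     norm = [str(r or "").lower().strip() for r in rules]
--     if any(r in ("*", "*/*") for r in norm):
--         return True
--     exact = {r for r in norm if r and not r.endswith("/*")}
--     if mime in exact:
--         return True
--     return any(mime.startswith(r[:-1]) for r in norm if r.endswith("/*"))
-- ===== Notes on version B (the rewrite author's own statement) =====
-- stated objective: alternative
-- what changed: Replaces A's single short-circuit loop (branching per rule) with three order-independent grouped passes over the normalized rules: a wildcard scan, an exact-match set lookup, and a prefix scan over the 'x/*' rules.
import Mathlib
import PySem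

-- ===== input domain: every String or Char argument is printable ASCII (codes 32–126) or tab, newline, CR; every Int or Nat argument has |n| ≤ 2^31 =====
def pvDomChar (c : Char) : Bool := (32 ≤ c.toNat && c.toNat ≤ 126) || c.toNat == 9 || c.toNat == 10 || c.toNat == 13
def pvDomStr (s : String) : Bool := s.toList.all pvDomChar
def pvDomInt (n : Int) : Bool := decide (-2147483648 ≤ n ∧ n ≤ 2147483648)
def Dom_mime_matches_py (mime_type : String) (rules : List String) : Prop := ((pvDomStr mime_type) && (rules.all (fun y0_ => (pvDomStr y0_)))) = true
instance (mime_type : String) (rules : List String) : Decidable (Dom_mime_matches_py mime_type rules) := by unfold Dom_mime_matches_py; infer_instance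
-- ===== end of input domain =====

-- B regroups the single short-circuit loop into three order-independent passes
-- (wildcard scan, exact-match set lookup, prefix scan over "x/*" rules): objective 'alternative' decomposition, same result.

-- ===== PORT A =====
-- literal port of A's single loop with early returns
def mimeLoopA (mime : String) : List String → Bool
  | [] => false
  | r :: rest =>
    let rv := PySem.Str.strip (PySem.Str.lower r)
    if rv == "" then mimeLoopA mime rest
    else if rv == "*" || rv == "*/*" then true
    else if PySem.Str.endswith rv "/*" then
      (if PySem.Str.startswith mime (PySem.Str.slice rv none (some (-1))) then true
       else mimeLoopA mime rest)
    else if mime == rv then true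
    else mimeLoopA mime rest

def mime_matches_py (mime_type : String) (rules : List String) : Bool :=
  mimeLoopA (PySem.Str.lower mime_type) rules

-- ===== PORT B =====
def mime_matches_py_alt (mime_type : String) (rules : List String) : Bool :=
  let mime := PySem.Str.lower mime_type
  let norm := rules.map (fun r => PySem.Str.strip (PySem.Str.lower r))
  if norm.any (fun r => r == "*" || r == "*/*") then true
  else
    let exact : PySem.Set String :=
      PySem.Set.ofList (norm.filter (fun r => !(r == "") && !(PySem.Str.endswith r "/*")))
    if PySem.Set.contains exact mime then true
    else (norm.filter (fun r => PySem.Str.endswith r "/*")).any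
           (fun r => PySem.Str.startswith mime (PySem.Str.slice r none (some (-1))))

-- ===== PRECONDITION & SPEC =====
def Spec_mime_matches_py (mime_type : String) (rules : List String) (out : Bool) : Prop := out = mime_matches_py_alt mime_type rules
instance (mime_type : String) (rules : List String) (out : Bool) : Decidable (Spec_mime_matches_py mime_type rules out) := by unfold Spec_mime_matches_py; infer_instance

-- ===== CLAIM (what is proved, stated in full; the proofs are below) =====
def Claim_equal_mime_matches_py : Prop := ∀ (mime_type : String) (rules : List String), Dom_mime_matches_py mime_type rules → Spec_mime_matches_py mime_type rules (mime_matches_py mime_type rules)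

-- ===== LEMMAS AND PROOFS =====

-- per-normalized-rule matching predicate characterising A's loop body
def pRule (mime rv : String) : Bool :=
  if rv == "" then false
  else if rv == "*" || rv == "*/*" then true
  else if PySem.Str.endswith rv "/*" then
    PySem.Str.startswith mime (PySem.Str.slice rv none (some (-1)))
  else mime == rv

theorem loopA_eq_any (mime : String) (l : List String) :
    mimeLoopA mime l = l.any (fun r => pRule mime (PySem.Str.strip (PySem.Str.lower r))) := by
  induction l with
  | nil => rfl
  | cons r rest ih =>
    rw [List.any_cons, ← ih]
    simp only [mimeLoopA]
    generalize PySem.Str.strip (PySem.Str.lower r) = rv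
    unfold pRule
    split_ifs <;> simp_all

theorem pRule_split (mime r : String) :
    ((r == "*" || r == "*/*") ||
      ((!(r == "") && !(PySem.Str.endswith r "/*")) && (r == mime)) ||
      (PySem.Str.endswith r "/*" &&
        PySem.Str.startswith mime (PySem.Str.slice r none (some (-1))))) = pRule mime r := by
  unfold pRule
  by_cases h0 : r = ""
  · subst h0
    have e1 : PySem.Chars.endswith ([] : List Char) ['/', '*'] = false := by decide
    simp [e1]
  · by_cases hw : r = "*" ∨ r = "*/*"
    · have hv : (r == "*" || r == "*/*") = true := by
        rcases hw with h | h <;> simp [h]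
      have h0' : (r == "") = false := by simp [h0]
      simp [hv, h0']
    · rw [not_or] at hw
      obtain ⟨h1, h2⟩ := hw
      by_cases he : PySem.Chars.endswith r.toList ['/', '*'] = true
      · simp [h0, h1, h2, he]
      · simp only [Bool.not_eq_true] at he
        have hmr : (r == mime) = (mime == r) := by
          by_cases h : r = mime
          · simp [h]
          · have h' : ¬ mime = r := fun hh => h hh.symm
            simp [h, h']
        have h0' : (r == "") = false := by simp [h0]
        have h1' : (r == "*") = false := by simp [h1]
        have h2' : (r == "*/*") = false := by simp [h2]
        simp [h0', h1', h2', he, hmr]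

theorem passes_eq (mime : String) (l : List String) :
    (if l.any (fun r => r == "*" || r == "*/*") then true
     else if PySem.Set.contains (PySem.Set.ofList
          (l.filter (fun r => !(r == "") && !(PySem.Str.endswith r "/*")))) mime then true
     else (l.filter (fun r => PySem.Str.endswith r "/*")).any
            (fun r => PySem.Str.startswith mime (PySem.Str.slice r none (some (-1))))) =
      l.any (pRule mime) := by
  rw [Bool.eq_iff_iff]
  constructor
  · intro h
    rw [List.any_eq_true]
    split_ifs at h with hw hc
    · obtain ⟨r, hr, hwr⟩ := List.any_eq_true.mp hw
      exact ⟨r, hr, by rw [← pRule_split]; simp [hwr]⟩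
    · have hm : mime ∈ l.filter (fun r => !(r == "") && !(PySem.Str.endswith r "/*")) := by
        simpa [PySem.Set.contains, PySem.Set.mem_ofList] using hc
      obtain ⟨hml, hg⟩ := List.mem_filter.mp hm
      have hg' : ¬mime = "" ∧ PySem.Chars.endswith mime.toList ['/', '*'] = false := by
        simpa using hg
      exact ⟨mime, hml, by rw [← pRule_split]; simp [hg'.1, hg'.2]⟩
    · obtain ⟨r, hr, hst⟩ := List.any_eq_true.mp h
      obtain ⟨hrl, hre⟩ := List.mem_filter.mp hr
      have hre' : PySem.Chars.endswith r.toList ['/', '*'] = true := by simpa using hre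
      have hst' : PySem.Chars.startswith mime.toList
          (PySem.List.slice r.toList none (some (-1))) = true := by simpa using hst
      exact ⟨r, hrl, by rw [← pRule_split]; simp [hre', hst']⟩
  · intro h
    obtain ⟨r, hr, hp⟩ := List.any_eq_true.mp h
    rw [← pRule_split] at hp
    split_ifs with hw hc
    · rfl
    · rfl
    · by_cases hwild : (r == "*" || r == "*/*") = true
      · have hwany : (l.any fun s => s == "*" || s == "*/*") = true :=
          List.any_eq_true.mpr ⟨r, hr, hwild⟩
        exact absurd hwany hw
      · by_cases he : PySem.Str.endswith r "/*" = true
        · have hst : PySem.Str.startswith mime (PySem.Str.slice r none (some (-1))) = true := by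
            simp only [Bool.or_eq_true, Bool.and_eq_true, Bool.not_eq_true'] at hp
            rcases hp with ((hx | hx) | ⟨⟨_, hne⟩, _⟩) | ⟨_, hst2⟩
            · exact absurd (show (r == "*" || r == "*/*") = true by simp [hx]) hwild
            · exact absurd (show (r == "*" || r == "*/*") = true by simp [hx]) hwild
            · exact absurd (he.symm.trans hne) (by decide)
            · exact hst2
          exact List.any_eq_true.mpr ⟨r, List.mem_filter.mpr ⟨hr, he⟩, hst⟩
        · have hmid : ((!(r == "") && !(PySem.Str.endswith r "/*")) && (r == mime)) = true := by
            simp only [Bool.or_eq_true] at hp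
            rcases hp with ((hx | hx) | hmid0) | hpref
            · exact absurd (show (r == "*" || r == "*/*") = true by simp [hx]) hwild
            · exact absurd (show (r == "*" || r == "*/*") = true by simp [hx]) hwild
            · exact hmid0
            · have hpe : PySem.Str.endswith r "/*" = true := by
                simp only [Bool.and_eq_true] at hpref
                exact hpref.1
              exact absurd hpe he
          obtain ⟨⟨hg1, hg2⟩, hem0⟩ := by simpa only [Bool.and_eq_true] using hmid
          have hg : (!(r == "") && !(PySem.Str.endswith r "/*")) = true := by
            simp [hg1]
            simpa using hg2
          have hem : r = mime := by simpa using hem0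
          subst hem
          have hcv : PySem.Set.contains (PySem.Set.ofList
              (l.filter (fun s => !(s == "") && !(PySem.Str.endswith s "/*")))) r = true := by
            simp only [PySem.Set.contains, List.contains_iff_mem, PySem.Set.mem_ofList]
            exact List.mem_filter.mpr ⟨hr, hg⟩
          exact absurd hcv hc

theorem any_map_fun {α β : Type} (f : α → β) (p : β → Bool) (l : List α) :
    (l.map f).any p = l.any (fun x => p (f x)) := by
  induction l with
  | nil => rfl
  | cons x xs ih => simp [ih]

-- ===== VERDICT (by name: the statement is the Claim_ definition above) =====
theorem mime_matches_py_spec : Claim_equal_mime_matches_py := by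
  intro mime_type rules _
  unfold Spec_mime_matches_py mime_matches_py
  rw [loopA_eq_any]
  exact ((any_map_fun (fun r => PySem.Str.strip (PySem.Str.lower r))
      (pRule (PySem.Str.lower mime_type)) rules).symm.trans
    (passes_eq (PySem.Str.lower mime_type)
      (rules.map fun r => PySem.Str.strip (PySem.Str.lower r))).symm)
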